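-- pv_equiv track=rewrite | github.com/robertodega/Refs | Python/NATIVE/functions.py | somma_con_info
-- ===== SOURCE A (Python) =====
-- def somma_con_info(L):
--     sum = 0
--     negativeFound = False
--     for i in L:
--         sum += i
--         if not negativeFound and i < 0:
--             negativeFound = True
--     return sum, negativeFound
-- ===== SOURCE B (Python) =====
-- def somma_con_info(L):
--     # Divide and conquer: recursively split the index range in half,
--     # combine (sum, negative-flag) of the two halves.
--     def go(lo, hi):
--         if hi <= lo:
--             return 0, False
--         if hi == lo + 1:
--             return L[lo], L[lo] < 0
--         mid = (lo + hi) // 2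
--         s1, n1 = go(lo, mid)
--         s2, n2 = go(mid, hi)
--         return s1 + s2, n1 or n2
--     return go(0, len(L))
-- ===== Notes on version B (the rewrite author's own statement) =====
-- stated objective: alternative
-- what changed: Replaces A's single fused linear loop carrying an accumulator and a flag with a divide-and-conquer recursion that splits the index range in half and combines (sum, negative-flag) of the two halves.
import Mathlib
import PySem

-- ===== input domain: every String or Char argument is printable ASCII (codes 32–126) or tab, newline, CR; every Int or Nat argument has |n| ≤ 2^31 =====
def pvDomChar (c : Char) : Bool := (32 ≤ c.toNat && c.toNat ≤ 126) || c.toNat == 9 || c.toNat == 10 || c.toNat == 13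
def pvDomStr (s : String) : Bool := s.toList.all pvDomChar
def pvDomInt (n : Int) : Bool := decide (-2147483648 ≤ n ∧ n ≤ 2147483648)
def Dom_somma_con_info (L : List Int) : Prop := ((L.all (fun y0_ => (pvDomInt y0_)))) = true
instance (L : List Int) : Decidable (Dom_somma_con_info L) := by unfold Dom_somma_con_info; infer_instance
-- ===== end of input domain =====

-- B replaces A's fused linear loop (accumulator + flag) with a divide-and-conquer recursion over index halves; alternative decomposition, same cost.

-- ===== PORT A =====
-- A: one fused loop over L carrying (sum, negativeFound)
def somma_con_info (L : List Int) : Int × Bool :=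
  L.foldl (fun st i =>
    let s := st.1 + i
    let nf := if !st.2 && i < 0 then true else st.2
    (s, nf)) (0, false)

-- ===== PORT B =====
-- B helper: go(lo, hi) — recursion on the half-open index range [lo, hi);
-- L[lo] is exact as L.getD lo 0 since the recursion only reads in-range indices.
def sciGo (L : List Int) (lo hi : Nat) : Int × Bool :=
  if hi ≤ lo then (0, false)
  else if hi = lo + 1 then
    (L.getD lo 0, decide (L.getD lo 0 < 0))
  else
    let mid := (lo + hi) / 2
    let p1 := sciGo L lo mid
    let p2 := sciGo L mid hi
    (p1.1 + p2.1, p1.2 || p2.2)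
termination_by hi - lo
decreasing_by all_goals omega

def somma_con_info_alt (L : List Int) : Int × Bool := sciGo L 0 L.length

-- ===== PRECONDITION & SPEC =====
def Spec_somma_con_info (L : List Int) (out : Int × Bool) : Prop := out = somma_con_info_alt L
instance (L : List Int) (out : Int × Bool) : Decidable (Spec_somma_con_info L out) := by unfold Spec_somma_con_info; infer_instance

-- ===== CLAIM (what is proved, stated in full; the proofs are below) =====
def Claim_equal_somma_con_info : Prop := ∀ (L : List Int), Dom_somma_con_info L → Spec_somma_con_info L (somma_con_info L)

-- ===== LEMMAS AND PROOFS =====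

-- A's fused fold computes (running sum, flag ∨ any-negative).
theorem somma_con_info_gen (L : List Int) (s : Int) (b : Bool) :
    L.foldl (fun st i =>
      let s := st.1 + i
      let nf := if !st.2 && i < 0 then true else st.2
      (s, nf)) (s, b)
      = (L.foldl (· + ·) s, b || L.any (fun i => decide (i < 0))) := by
  induction L generalizing s b with
  | nil => simp
  | cons h t ih =>
      simp only [List.foldl_cons, List.any_cons, ih]
      cases b <;> by_cases h0 : h < 0 <;> simp [h0]

theorem foldl_add_eq_sum (L : List Int) (s : Int) :
    L.foldl (· + ·) s = s + L.sum := by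
  induction L generalizing s with
  | nil => simp
  | cons h t ih => simp [List.foldl_cons, ih]; ring

-- B's divide and conquer computes (sum, any-negative) of the slice [lo, hi).
theorem sciGo_eq (L : List Int) (lo hi : Nat) (hhi : hi ≤ L.length) :
    sciGo L lo hi = (((L.drop lo).take (hi - lo)).sum,
                     ((L.drop lo).take (hi - lo)).any (fun i => decide (i < 0))) := by
  by_cases hle : hi ≤ lo
  · rw [sciGo]
    simp [hle, Nat.sub_eq_zero_of_le hle]
  · by_cases hone : hi = lo + 1
    · subst hone
      rw [sciGo, if_neg (by omega), if_pos rfl]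
      have hlt : lo < L.length := by omega
      have hd : L.drop lo = L[lo] :: L.drop (lo + 1) := List.drop_eq_getElem_cons hlt
      have hgd : L.getD lo 0 = L[lo] := by
        rw [List.getD, List.getElem?_eq_getElem hlt]; rfl
      have ht : lo + 1 - lo = 1 := by omega
      rw [hgd, ht, hd]
      simp only [List.take_succ_cons, List.take_zero, List.sum_cons, List.sum_nil,
        List.any_cons, List.any_nil, Bool.or_false, add_zero]
    · rw [sciGo]
      have hmid1 : lo < (lo + hi) / 2 := by omega
      have hmid2 : (lo + hi) / 2 < hi := by omega
      have ih1 := sciGo_eq L lo ((lo + hi) / 2) (by omega)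
      have ih2 := sciGo_eq L ((lo + hi) / 2) hi hhi
      simp only [hle, hone, if_false, ih1, ih2]
      have hsplit : (L.drop lo).take (hi - lo)
          = (L.drop lo).take ((lo + hi) / 2 - lo)
            ++ (L.drop ((lo + hi) / 2)).take (hi - (lo + hi) / 2) := by
        have h1 : hi - lo = ((lo + hi) / 2 - lo) + (hi - (lo + hi) / 2) := by omega
        have h2 : lo + ((lo + hi) / 2 - lo) = (lo + hi) / 2 := by omega
        rw [h1, List.take_add, List.drop_drop, h2]
      simp [hsplit]
termination_by hi - lo
decreasing_by all_goals omega

-- ===== VERDICT (by name: the statement is the Claim_ definition above) =====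
theorem somma_con_info_spec : Claim_equal_somma_con_info := by
  intro L _
  unfold Spec_somma_con_info somma_con_info somma_con_info_alt
  rw [sciGo_eq L 0 L.length (le_refl _), somma_con_info_gen, foldl_add_eq_sum]
  simp
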